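-- pv_equiv track=rewrite | github.com/philornot/Informatyka4Klasa | informator2025/zadanie2/2-4.py | sprawdz_poprawnosc
-- ===== SOURCE A (Python) =====
-- def sprawdz_poprawnosc(wyrazenie):
--     glebokosc = 0
--     for znak in wyrazenie:
--         if znak == '[':
--             glebokosc += 1
--         elif znak == ']':
--             glebokosc -= 1
--         else:
--             return 0
--     return glebokosc
-- ===== SOURCE B (Python) =====
-- def sprawdz_poprawnosc(wyrazenie):
--     if not all(znak in '[]' for znak in wyrazenie):
--         return 0
--     return wyrazenie.count('[') - wyrazenie.count(']')
-- ===== Notes on version B (the rewrite author's own statement) =====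
-- stated objective: simpler
-- what changed: Replaces the single fused loop with an early-return accumulator by a validation pass (all chars are brackets, else 0) followed by count('[') - count(']'), separating validation from counting.
import Mathlib
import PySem

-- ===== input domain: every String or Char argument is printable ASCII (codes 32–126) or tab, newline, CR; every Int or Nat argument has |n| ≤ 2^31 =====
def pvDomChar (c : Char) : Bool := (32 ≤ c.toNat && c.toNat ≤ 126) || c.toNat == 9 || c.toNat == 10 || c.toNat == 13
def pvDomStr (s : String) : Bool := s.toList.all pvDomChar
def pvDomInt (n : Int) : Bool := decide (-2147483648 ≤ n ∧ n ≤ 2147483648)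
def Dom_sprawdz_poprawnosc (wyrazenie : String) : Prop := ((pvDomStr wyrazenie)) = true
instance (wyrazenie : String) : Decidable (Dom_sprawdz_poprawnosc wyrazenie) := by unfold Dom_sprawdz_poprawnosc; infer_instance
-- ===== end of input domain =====

-- B separates validation (all chars are brackets, else 0) from counting ('[' count minus ']' count); objective: simpler decomposition.


-- ===== PORT A =====
-- A's for-loop with early `return 0`: structural recursion over the characters carrying glebokosc
def sprawdzLoop : List Char → Int → Int
  | [], glebokosc => glebokosc
  | znak :: rest, glebokosc =>
    if znak = '[' then sprawdzLoop rest (glebokosc + 1)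
    else if znak = ']' then sprawdzLoop rest (glebokosc - 1)
    else 0

def sprawdz_poprawnosc (wyrazenie : String) : Int := sprawdzLoop wyrazenie.toList 0

-- ===== PORT B =====
def sprawdz_poprawnosc_alt (wyrazenie : String) : Int :=
  if ¬ (wyrazenie.toList.all (fun znak => znak = '[' ∨ znak = ']')) then 0
  else (PySem.Str.count wyrazenie "[" : Int) - (PySem.Str.count wyrazenie "]" : Int)

-- ===== PRECONDITION & SPEC =====
def Spec_sprawdz_poprawnosc (wyrazenie : String) (out : Int) : Prop := out = sprawdz_poprawnosc_alt wyrazenie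
instance (wyrazenie : String) (out : Int) : Decidable (Spec_sprawdz_poprawnosc wyrazenie out) := by unfold Spec_sprawdz_poprawnosc; infer_instance

-- ===== CLAIM (what is proved, stated in full; the proofs are below) =====
def Claim_equal_sprawdz_poprawnosc : Prop := ∀ (wyrazenie : String), Dom_sprawdz_poprawnosc wyrazenie → Spec_sprawdz_poprawnosc wyrazenie (sprawdz_poprawnosc wyrazenie)

-- ===== LEMMAS AND PROOFS =====

-- characterisation of A's fused loop: all-bracket input ⇒ acc + (#'[' - #']'), any other char ⇒ 0
theorem sprawdzLoop_eq (cs : List Char) (acc : Int) :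
    sprawdzLoop cs acc =
      if cs.all (fun c => c = '[' ∨ c = ']') then
        acc + ((cs.count '[' : Int) - (cs.count ']' : Int))
      else 0 := by
  induction cs generalizing acc with
  | nil => simp [sprawdzLoop]
  | cons c rest ih =>
    by_cases h1 : c = '['
    · subst h1
      simp [sprawdzLoop, ih]
      split_ifs
      · ring
      · rfl
    · by_cases h2 : c = ']'
      · subst h2
        simp [sprawdzLoop, ih]
        split_ifs
        · ring
        · rfl
      · simp [sprawdzLoop, h1, h2, List.all_cons]

-- Python str.count with a single-character needle counts exactly the occurrences of that character
theorem chars_count_go_single (ch : Char) : ∀ (l : List Char) (fuel acc : Nat), l.length ≤ fuel →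
    PySem.Chars.count.go [ch] fuel l acc = acc + l.count ch := by
  intro l
  induction l with
  | nil => intro fuel acc _; cases fuel <;> simp [PySem.Chars.count.go]
  | cons h t ih =>
    intro fuel acc hle
    cases fuel with
    | zero => simp at hle
    | succ n =>
      by_cases hc : ch = h
      · subst hc
        simp only [PySem.Chars.count.go, List.isPrefixOf]
        simp only [List.length_cons, List.length_nil, List.drop_succ_cons, List.drop_zero,
          beq_self_eq_true, Bool.and_true, if_true]
        rw [ih n (acc + 1) (by simpa using hle)]
        simp
        omega
      · simp [PySem.Chars.count.go, List.isPrefixOf, hc]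
        rw [ih n acc (by simpa using hle)]
        simp [Ne.symm hc]

theorem str_count_single (w : String) (ch : Char) :
    PySem.Str.count w (String.ofList [ch]) = w.toList.count ch := by
  simp only [PySem.Str.count, PySem.Chars.count]
  rw [if_neg (by simp)]
  have h1 : (String.ofList [ch]).toList = [ch] := by simp
  rw [h1]
  rw [chars_count_go_single ch w.toList w.toList.length 0 (le_refl _)]
  simp

-- ===== VERDICT (by name: the statement is the Claim_ definition above) =====
theorem sprawdz_poprawnosc_spec : Claim_equal_sprawdz_poprawnosc := by
  intro w _
  show sprawdz_poprawnosc w = sprawdz_poprawnosc_alt w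
  rw [sprawdz_poprawnosc, sprawdzLoop_eq, sprawdz_poprawnosc_alt]
  have h1 : PySem.Str.count w "[" = w.toList.count '[' := str_count_single w '['
  have h2 : PySem.Str.count w "]" = w.toList.count ']' := str_count_single w ']'
  rw [h1, h2]
  split_ifs with hv
  · simp
  · rfl
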